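-- pv_equiv track=rewrite | github.com/YuJin220102/Programmers-Algorithm | Programmers/[Level 2]/기능개발.py | solution
-- ===== SOURCE A (Python) =====
-- def solution(progresses, speeds):
--     p_list = []
--     count, index = 0, 0
--
--     while(True):
--         if(index == len(speeds)) : break
--         if(progresses[index] <= 100):
--             progresses[index] += speeds[index]
--             count += 1
--         else:
--             if((progresses[index] - speeds[index]) == 100) : count -= 1
--             p_list.append(count)
--             index += 1
--             count = 0
--
--     count, index = 1, 0
--     answer = []
--     for i in range(1, len(p_list)):
--         if(p_list[index] >= p_list[i]):
--             count += 1
--         else: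
--             answer.append(count)
--             index += count
--             count = 1
--
--     answer.append(count)
--     return answer
-- ===== SOURCE B (Python) =====
-- def solution(progresses, speeds):
--     # Closed form per feature: ceil((100 - p) / s) days (0 if already complete),
--     # then one grouping pass over the day counts.
--     days = [0 if p > 100 else -((p - 100) // s) for p, s in zip(progresses, speeds)]
--     answer = []
--     leader = days[0] if days else 0
--     count = 1
--     for d in days[1:]:
--         if d > leader:
--             answer.append(count)
--             leader, count = d, 1
--         else:
--             count += 1
--     answer.append(count)
--     return answer
-- ===== Notes on version B (the rewrite author's own statement) =====
-- stated objective: alternative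
-- what changed: Replaces A's day-by-day simulation of every feature's progress and its two-pass index-jumping grouping with a single linear scan that computes each feature's remaining days in closed form (ceiling division) and groups on the fly.
-- intended difference: When the first feature is over-complete by exactly its speed (A counts its days as -1) and, after a run of features over-complete by exactly their speed, an already-complete feature follows, A splits the first deploy batch too early; B counts already-complete features as 0 days and returns the intended batch sizes. — e.g. on solution([103, 150], [3, 5]): A returns [1, 1], B returns [2]
import Mathlib
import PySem

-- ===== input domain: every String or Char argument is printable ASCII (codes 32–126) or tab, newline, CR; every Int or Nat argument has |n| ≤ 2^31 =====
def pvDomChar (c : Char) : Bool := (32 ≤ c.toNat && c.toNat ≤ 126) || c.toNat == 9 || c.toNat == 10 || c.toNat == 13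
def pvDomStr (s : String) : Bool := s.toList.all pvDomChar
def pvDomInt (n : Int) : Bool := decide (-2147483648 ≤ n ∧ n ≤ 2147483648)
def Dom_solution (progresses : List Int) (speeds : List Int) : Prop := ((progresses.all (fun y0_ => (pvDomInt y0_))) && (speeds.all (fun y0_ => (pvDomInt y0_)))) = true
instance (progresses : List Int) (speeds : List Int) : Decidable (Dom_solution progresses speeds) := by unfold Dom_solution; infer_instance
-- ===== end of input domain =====

-- B replaces A's day-by-day simulation with per-feature closed-form ceiling division and a single
-- grouping pass; A mutates `progresses` in place, B does not — the claims are about the return value only.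

-- ===== PORT A =====
-- inner while-iterations of A for one feature: adds speed while progress ≤ 100, counting;
-- the Nat argument is a fuel bound only (always called with fuel > number of iterations).
def pvInnerA : Nat → Int → Int → Int → Int
  | 0, _, _, count => count
  | fuel + 1, p, s, count =>
      if p ≤ 100 then pvInnerA fuel (p + s) s (count + 1)
      else if p - s = 100 then count - 1 else count

-- A's outer while loop over index; the Nat fuel k is speeds.length - index (loop runs to len(speeds)).
def pvLoopA (progresses speeds : List Int) : Nat → Nat → List Int
  | _, 0 => []
  | index, k + 1 =>
      let p := PySem.List.pyGetD progresses (index : Int) 0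
      let s := PySem.List.pyGetD speeds (index : Int) 0
      pvInnerA ((101 - p).toNat + 1) p s 0 :: pvLoopA progresses speeds (index + 1) k

-- A's second loop body: state (answer, index, count)
def pvStepA (pl : List Int) (st : List Int × Int × Int) (i : Int) : List Int × Int × Int :=
  if PySem.List.pyGetD pl st.2.1 0 ≥ PySem.List.pyGetD pl i 0 then (st.1, st.2.1, st.2.2 + 1)
  else (st.1 ++ [st.2.2], st.2.1 + st.2.2, 1)

def solution (progresses : List Int) (speeds : List Int) : List Int :=
  let plist := pvLoopA progresses speeds 0 speeds.length
  let st := (PySem.List.pyRange 1 (plist.length : Int) 1).foldl (pvStepA plist) ([], 0, 1)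
  st.1 ++ [st.2.2]

-- ===== PORT B =====
-- remaining days of one feature: 0 if already complete, else ceil((100-p)/s) = -((p-100)//s)
def pvDaysB (p s : Int) : Int :=
  if 100 < p then 0 else -(PySem.Int.floordiv (p - 100) s)

-- B's grouping loop body: state (answer, leader, count)
def pvStepB (st : List Int × Int × Int) (d : Int) : List Int × Int × Int :=
  if st.2.1 < d then (st.1 ++ [st.2.2], d, 1) else (st.1, st.2.1, st.2.2 + 1)

def solution_alt (progresses : List Int) (speeds : List Int) : List Int :=
  let days := (progresses.zip speeds).map (fun x => pvDaysB x.1 x.2)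
  let st := days.tail.foldl pvStepB ([], days.headD 0, 1)
  st.1 ++ [st.2.2]

-- ===== PRECONDITION & SPEC =====
-- Pre_ is exactly the set of inputs on which A returns: A raises IndexError when speeds is
-- longer than progresses, and loops forever on a feature with progress ≤ 100 and speed ≤ 0.
def Pre_solution (progresses : List Int) (speeds : List Int) : Prop :=
  speeds.length ≤ progresses.length ∧ ∀ x ∈ progresses.zip speeds, 0 < x.2 ∨ 100 < x.1
instance (progresses : List Int) (speeds : List Int) : Decidable (Pre_solution progresses speeds) := by unfold Pre_solution; infer_instance
def pvWitness_solution : List Int × List Int := ([30, 55], [30, 5])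

-- an "over-complete by exactly its speed" feature: A counts its days as -1
-- (under Pre_, x.1 - x.2 = 100 already forces x.1 > 100)
def pvQ (x : Int × Int) : Bool := x.1 - x.2 == 100

-- When the first feature is over-complete by exactly its speed (A counts its days as -1) and —
-- after a run of features over-complete by exactly their speed — an already-complete feature
-- follows, A splits the first deploy batch too early; B counts already-complete features as
-- 0 days and returns the intended batch sizes.
def D_solution (progresses : List Int) (speeds : List Int) : Prop :=
  let z := progresses.zip speeds
  let w := z.dropWhile pvQ
  w ≠ z ∧ 100 ≤ (w.headD (0, 0)).1
instance (progresses : List Int) (speeds : List Int) : Decidable (D_solution progresses speeds) := by unfold D_solution; infer_instance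

def Spec_solution (progresses : List Int) (speeds : List Int) (out : List Int) : Prop :=
  ¬ D_solution progresses speeds → out = solution_alt progresses speeds
instance (progresses : List Int) (speeds : List Int) (out : List Int) : Decidable (Spec_solution progresses speeds out) := by unfold Spec_solution; infer_instance

def pvDiffWitness_solution : List Int × List Int := ([103, 150], [3, 5])
def pvDiffWitnessOut_solution : (List Int) × (List Int) := ([1, 1], [2])

-- ===== CLAIM (what is proved, stated in full; the proofs are below) =====
def Claim_unchanged_solution : Prop := ∀ (progresses : List Int) (speeds : List Int), Dom_solution progresses speeds → Pre_solution progresses speeds → Spec_solution progresses speeds (solution progresses speeds)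
def Claim_exact_solution : Prop := ∀ (progresses : List Int) (speeds : List Int), Dom_solution progresses speeds → Pre_solution progresses speeds → D_solution progresses speeds → solution progresses speeds ≠ solution_alt progresses speeds
def Claim_changed_solution : Prop := Dom_solution (pvDiffWitness_solution.1) (pvDiffWitness_solution.2) ∧ Pre_solution (pvDiffWitness_solution.1) (pvDiffWitness_solution.2) ∧ D_solution (pvDiffWitness_solution.1) (pvDiffWitness_solution.2) ∧ solution (pvDiffWitness_solution.1) (pvDiffWitness_solution.2) = pvDiffWitnessOut_solution.1 ∧ solution_alt (pvDiffWitness_solution.1) (pvDiffWitness_solution.2) = pvDiffWitnessOut_solution.2 ∧ pvDiffWitnessOut_solution.1 ≠ pvDiffWitnessOut_solution.2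


-- ===== LEMMAS AND PROOFS =====

-- A's per-feature day count in closed form
def pvDaysA (x : Int × Int) : Int :=
  if 100 < x.1 then (if x.1 - x.2 = 100 then -1 else 0)
  else -(PySem.Int.floordiv (x.1 - 100) x.2)

-- reference grouping: leader L, current batch size c
def pvRun (L c : Int) : List Int → List Int
  | [] => [c]
  | d :: t => if L ≥ d then pvRun L (c + 1) t else c :: pvRun d 1 t

theorem pvInnerA_le (s : Int) (hs : 0 < s) :
    ∀ (fuel : Nat) (p c : Int), p ≤ 100 → (101 - p).toNat + 1 ≤ fuel →
      pvInnerA fuel p s c = c + (-(PySem.Int.floordiv (p - 100) s)) := by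
  intro fuel
  induction fuel with
  | zero => intro p c hp hf; omega
  | succ f ih =>
    intro p c hp hf
    simp only [pvInnerA, if_pos hp]
    by_cases hps : p + s ≤ 100
    · rw [ih (p + s) (c + 1) hps (by omega)]
      have hq := (PySem.Int.floordiv_eq_iff_of_pos hs
        (a := p - 100) (q := PySem.Int.floordiv (p - 100) s)).mp rfl
      have h2 : PySem.Int.floordiv (p + s - 100) s = PySem.Int.floordiv (p - 100) s + 1 := by
        rw [PySem.Int.floordiv_eq_iff_of_pos hs]
        constructor <;> nlinarith [hq.1, hq.2]
      rw [h2]; ring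
    · obtain ⟨f', rfl⟩ : ∃ f', f = f' + 1 := ⟨f - 1, by omega⟩
      simp only [pvInnerA, if_neg (by omega : ¬ (p + s ≤ 100))]
      by_cases hp100 : p = 100
      · subst hp100
        have h0 : PySem.Int.floordiv ((100 : Int) - 100) s = 0 := by
          rw [PySem.Int.floordiv_eq_iff_of_pos hs]
          constructor <;> nlinarith
      
        rw [if_pos (by ring), h0]; ring
      · have hplt : p < 100 := lt_of_le_of_ne hp hp100
        have hm1 : PySem.Int.floordiv (p - 100) s = -1 := by
          rw [PySem.Int.floordiv_eq_iff_of_pos hs]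
          constructor <;> nlinarith
        rw [if_neg (by intro h; exact hp100 (by linarith)), hm1]; ring

theorem pvLoopA_eq (progresses speeds : List Int)
    (hlen : speeds.length ≤ progresses.length)
    (hpre : ∀ x ∈ progresses.zip speeds, 0 < x.2 ∨ 100 < x.1) :
    ∀ (k index : Nat), index + k = speeds.length →
      pvLoopA progresses speeds index k = ((progresses.zip speeds).drop index).map pvDaysA := by
  intro k
  induction k with
  | zero =>
    intro index h
    have hz : (progresses.zip speeds).length ≤ index := by
      simp only [List.length_zip]; omega
    rw [pvLoopA, List.drop_eq_nil_of_le hz, List.map_nil]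
  | succ k ih =>
    intro index h
    have hzl : (progresses.zip speeds).length = speeds.length := by
      simp only [List.length_zip]; omega
    have hidx : index < (progresses.zip speeds).length := by omega
    have hip : index < progresses.length := by omega
    have his : index < speeds.length := by omega
    rw [pvLoopA, List.drop_eq_getElem_cons hidx, List.map_cons, ih (index + 1) (by omega)]
    have hz : (progresses.zip speeds)[index] = (progresses[index], speeds[index]) :=
      List.getElem_zip
    have hp' : PySem.List.pyGetD progresses ((index : Nat) : Int) 0 = progresses[index] := by
      rw [PySem.List.pyGetD_natCast]; exact List.getD_eq_getElem _ _ hip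
    have hs' : PySem.List.pyGetD speeds ((index : Nat) : Int) 0 = speeds[index] := by
      rw [PySem.List.pyGetD_natCast]; exact List.getD_eq_getElem _ _ his
    have hmem : (progresses[index], speeds[index]) ∈ progresses.zip speeds :=
      hz ▸ List.getElem_mem hidx
    have hx := hpre _ hmem
    simp only [hp', hs', hz]
    congr 1
    by_cases h100 : 100 < progresses[index]
    · simp only [pvInnerA, if_neg (by omega : ¬ (progresses[index] ≤ 100)), pvDaysA,
        if_pos h100]
      split <;> ring
    · have hspos : 0 < speeds[index] := hx.resolve_right h100
      rw [pvInnerA_le _ hspos _ _ 0 (by omega) (le_refl _)]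
      simp only [pvDaysA, if_neg h100]
      ring

theorem pvPhase2_eq (pl : List Int) :
    ∀ (t : List Int) (i : Nat) (index count L : Int) (ans : List Int),
      pl.drop i = t → 0 ≤ index → 1 ≤ count → index + count = (i : Int) →
      PySem.List.pyGetD pl index 0 = L →
      ((PySem.List.pyRange (i : Int) (pl.length : Int) 1).foldl (pvStepA pl) (ans, index, count)).1 ++
        [((PySem.List.pyRange (i : Int) (pl.length : Int) 1).foldl (pvStepA pl) (ans, index, count)).2.2] =
      ans ++ pvRun L count t := by
  intro t
  induction t with
  | nil =>
    intro i index count L ans hdrop h0 h1 hic hL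
    have hlen : pl.length ≤ i := by
      have := congrArg List.length hdrop
      simp only [List.length_drop, List.length_nil] at this; omega
    rw [PySem.List.pyRange_one_eq_nil (by exact_mod_cast hlen)]
    simp [pvRun]
  | cons d t' ih =>
    intro i index count L ans hdrop h0 h1 hic hL
    have hi : i < pl.length := by
      have := congrArg List.length hdrop
      simp only [List.length_drop, List.length_cons] at this; omega
    have hdl : pl[i] = d := by
      have h00 : (pl.drop i)[0]'(by rw [hdrop]; simp) = d := by
        simp only [hdrop]; rfl
      rw [List.getElem_drop] at h00
      simpa using h00
    have hdrop' : pl.drop (i + 1) = t' := by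
      rw [← List.tail_drop, hdrop]; rfl
    have hgi : PySem.List.pyGetD pl ((i : Nat) : Int) 0 = d := by
      rw [PySem.List.pyGetD_natCast]
      rw [List.getD_eq_getElem _ _ hi]; exact hdl
    rw [PySem.List.pyRange_one_cons (by exact_mod_cast hi), List.foldl_cons]
    by_cases hcmp : L ≥ d
    · have hstep : pvStepA pl (ans, index, count) ((i : Nat) : Int) = (ans, index, count + 1) := by
        simp only [pvStepA, hL, hgi]
        rw [if_pos hcmp]
      rw [hstep]
      have hcast : ((i : Int) + 1) = (((i + 1 : Nat)) : Int) := by push_cast; ring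
      rw [hcast, ih (i + 1) index (count + 1) L ans hdrop' h0 (by omega) (by push_cast; omega) hL]
      simp only [pvRun, if_pos hcmp]
    · have hstep : pvStepA pl (ans, index, count) ((i : Nat) : Int) =
          (ans ++ [count], index + count, 1) := by
        simp only [pvStepA, hL, hgi]
        rw [if_neg hcmp]
      rw [hstep, hic]
      have hcast : ((i : Int) + 1) = (((i + 1 : Nat)) : Int) := by push_cast; ring
      rw [hcast, ih (i + 1) ((i : Nat) : Int) 1 d (ans ++ [count]) hdrop' (by positivity)
        (le_refl 1) (by push_cast; ring) hgi]
      simp only [pvRun, if_neg hcmp, List.append_assoc, List.singleton_append]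

theorem pvFoldB_eq :
    ∀ (t : List Int) (ans : List Int) (L c : Int),
      (t.foldl pvStepB (ans, L, c)).1 ++ [(t.foldl pvStepB (ans, L, c)).2.2] =
      ans ++ pvRun L c t := by
  intro t
  induction t with
  | nil => intro ans L c; rfl
  | cons d t' ih =>
    intro ans L c
    simp only [List.foldl_cons]
    by_cases hd : L < d
    · have hstep : pvStepB (ans, L, c) d = (ans ++ [c], d, 1) := by
        simp only [pvStepB]; rw [if_pos hd]
      rw [hstep, ih]
      simp only [pvRun, if_neg (by omega : ¬ (L ≥ d)), List.append_assoc,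
        List.singleton_append]
    · have hstep : pvStepB (ans, L, c) d = (ans, L, c + 1) := by
        simp only [pvStepB]; rw [if_neg hd]
      rw [hstep, ih]
      simp only [pvRun, if_pos (by omega : L ≥ d)]

theorem pvDays_facts (x : Int × Int) (hx : 0 < x.2 ∨ 100 < x.1) :
    pvDaysB x.1 x.2 = max (pvDaysA x) 0 ∧ -1 ≤ pvDaysA x ∧
    (pvQ x = true ↔ pvDaysA x = -1) ∧
    (pvQ x = false → (pvDaysA x = 0 ↔ 100 ≤ x.1)) := by
  by_cases h100 : 100 < x.1
  · simp only [pvDaysA, pvDaysB, if_pos h100]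
    by_cases hq : x.1 - x.2 = 100
    · refine ⟨by simp [hq], by simp [hq], by simp [pvQ, hq], by simp [pvQ, hq]⟩
    · refine ⟨by simp [hq], by simp [hq], by simp [pvQ, hq], fun _ => by simp [hq]; omega⟩
  · have hs : 0 < x.2 := hx.resolve_right h100
    have hp : x.1 ≤ 100 := not_lt.mp h100
    have hq : pvQ x = false := by simp only [pvQ, beq_eq_false_iff_ne, ne_eq]; omega
    have hfd : PySem.Int.floordiv (x.1 - 100) x.2 < 1 := by
      rw [PySem.Int.floordiv_lt_iff_lt_mul hs]; nlinarith
    have hdA : pvDaysA x = -(PySem.Int.floordiv (x.1 - 100) x.2) := by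
      simp [pvDaysA, h100]
    refine ⟨?_, by omega, ?_, ?_⟩
    · simp only [pvDaysB, if_neg h100, hdA]
      omega
    · rw [hq, hdA]
      constructor
      · intro h; cases h
      · intro h; omega
    · intro _
      rw [hdA]
      constructor
      · intro h
        have h0 : PySem.Int.floordiv (x.1 - 100) x.2 = 0 := by omega
        have := (PySem.Int.floordiv_eq_iff_of_pos hs (a := x.1 - 100) (q := 0)).mp h0
        nlinarith [this.1]
      · intro h
        have h1 : x.1 = 100 := by omega
        have h0 : PySem.Int.floordiv (x.1 - 100) x.2 = 0 := by
          rw [PySem.Int.floordiv_eq_iff_of_pos hs]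
          constructor <;> nlinarith
        omega

theorem pvRun_map_max :
    ∀ (t : List Int), (∀ d ∈ t, -1 ≤ d) → ∀ (L c : Int), 0 ≤ L →
      pvRun L c t = pvRun L c (t.map (fun d => max d 0)) := by
  intro t
  induction t with
  | nil => intro _ L c _; rfl
  | cons d t' ih =>
    intro h L c hL
    simp only [List.map_cons, pvRun]
    by_cases hdL : L ≥ d
    · rw [if_pos hdL, if_pos (by omega : L ≥ max d 0)]
      exact ih (fun y hy => h y (List.mem_cons_of_mem _ hy)) L (c + 1) hL
    · have hd0 : 0 ≤ d := by omega
      rw [if_neg hdL, max_eq_left hd0, if_neg hdL]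
      exact congrArg (List.cons c) (ih (fun y hy => h y (List.mem_cons_of_mem _ hy)) d 1 hd0)

theorem pvRun_neg_one :
    ∀ (tp : List (Int × Int)), (∀ x ∈ tp, 0 < x.2 ∨ 100 < x.1) →
      ((tp.dropWhile pvQ).headD (0, 0)).1 < 100 →
      ∀ (c : Int),
        pvRun (-1) c (tp.map pvDaysA) = pvRun 0 c (tp.map (fun x => pvDaysB x.1 x.2)) := by
  intro tp
  induction tp with
  | nil => intro _ _ c; rfl
  | cons x tp' ih =>
    intro hpre hfalse c
    have hx := hpre x List.mem_cons_self
    obtain ⟨hB, hge, hqiff, hnonq⟩ := pvDays_facts x hx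
    have hpre' : ∀ y ∈ tp', 0 < y.2 ∨ 100 < y.1 :=
      fun y hy => hpre y (List.mem_cons_of_mem _ hy)
    simp only [List.map_cons, pvRun]
    by_cases hq : pvQ x = true
    · have hA : pvDaysA x = -1 := hqiff.mp hq
      have hBe : pvDaysB x.1 x.2 = 0 := by rw [hB, hA]; rfl
      rw [hA, hBe, if_pos (le_refl (-1 : Int)), if_pos (le_refl (0 : Int))]
      rw [List.dropWhile_cons_of_pos hq] at hfalse
      exact ih hpre' hfalse (c + 1)
    · have hqf : pvQ x = false := by simpa using hq
      rw [List.dropWhile_cons_of_neg (by simp [hqf])] at hfalse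
      simp only [List.headD_cons] at hfalse
      have hA1 : 1 ≤ pvDaysA x := by
        have h1 : pvDaysA x ≠ -1 := fun h => by rw [hqiff.mpr h] at hqf; cases hqf
        have h2 : pvDaysA x ≠ 0 := fun h => absurd ((hnonq hqf).mp h) (by omega)
        omega
      have hBx : pvDaysB x.1 x.2 = pvDaysA x := by rw [hB]; exact max_eq_left (by omega)
      rw [hBx, if_neg (by omega : ¬ ((-1 : Int) ≥ pvDaysA x)),
        if_neg (by omega : ¬ ((0 : Int) ≥ pvDaysA x))]
      refine congrArg (List.cons c) ?_
      have hmm : tp'.map (fun y => pvDaysB y.1 y.2) = (tp'.map pvDaysA).map (fun d => max d 0) := by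
        rw [List.map_map]
        exact List.map_congr_left (fun y hy => (pvDays_facts y (hpre' y hy)).1)
      rw [hmm]
      exact pvRun_map_max _ (fun d hd => by
        obtain ⟨y, hy, rfl⟩ := List.mem_map.mp hd
        exact (pvDays_facts y (hpre' y hy)).2.1) _ 1 (by omega)

theorem solution_eq_run (progresses speeds : List Int)
    (hlen : speeds.length ≤ progresses.length)
    (hpre : ∀ x ∈ progresses.zip speeds, 0 < x.2 ∨ 100 < x.1)
    (x : Int × Int) (tp : List (Int × Int)) (hzip : progresses.zip speeds = x :: tp) :
    solution progresses speeds = pvRun (pvDaysA x) 1 (tp.map pvDaysA) := by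
  show (let plist := pvLoopA progresses speeds 0 speeds.length
        let st := (PySem.List.pyRange 1 (plist.length : Int) 1).foldl (pvStepA plist) ([], 0, 1)
        st.1 ++ [st.2.2]) = _
  have hloop : pvLoopA progresses speeds 0 speeds.length =
      pvDaysA x :: tp.map pvDaysA := by
    rw [pvLoopA_eq progresses speeds hlen hpre speeds.length 0 (by omega)]
    rw [List.drop_zero, hzip, List.map_cons]
  simp only [hloop]
  have h1 : ((1 : Nat) : Int) = (1 : Int) := by norm_num
  have := pvPhase2_eq (pvDaysA x :: tp.map pvDaysA) (tp.map pvDaysA) 1 0 1 (pvDaysA x) []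
    rfl (le_refl 0) (le_refl 1) (by norm_num) (PySem.List.pyGetD_zero_cons _ _ _)
  rw [h1] at this
  simpa using this

theorem solution_alt_eq_run (progresses speeds : List Int)
    (x : Int × Int) (tp : List (Int × Int)) (hzip : progresses.zip speeds = x :: tp) :
    solution_alt progresses speeds =
      pvRun (pvDaysB x.1 x.2) 1 (tp.map (fun y => pvDaysB y.1 y.2)) := by
  show (let days := (progresses.zip speeds).map (fun y => pvDaysB y.1 y.2)
        let st := days.tail.foldl pvStepB ([], days.headD 0, 1)
        st.1 ++ [st.2.2]) = _
  rw [hzip]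
  simp only [List.map_cons, List.headD_cons, List.tail_cons]
  have := pvFoldB_eq (tp.map (fun y => pvDaysB y.1 y.2)) [] (pvDaysB x.1 x.2) 1
  simpa using this

-- the first element emitted by pvRun is its running count plus absorbed elements, so ≥ count
theorem pvRun_head :
    ∀ (t : List Int) (L c : Int), ∃ h rest, pvRun L c t = h :: rest ∧ c ≤ h := by
  intro t
  induction t with
  | nil => intro L c; exact ⟨c, [], rfl, le_refl c⟩
  | cons d t' ih =>
    intro L c
    simp only [pvRun]
    by_cases hd : L ≥ d
    · obtain ⟨h, rest, heq, hle⟩ := ih L (c + 1)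
      exact ⟨h, rest, by rw [if_pos hd]; exact heq, by omega⟩
    · exact ⟨c, _, by rw [if_neg hd], le_refl c⟩

theorem pvRun_neg_one_ne :
    ∀ (tp : List (Int × Int)), (∀ x ∈ tp, 0 < x.2 ∨ 100 < x.1) →
      100 ≤ ((tp.dropWhile pvQ).headD (0, 0)).1 →
      ∀ (c : Int),
        pvRun (-1) c (tp.map pvDaysA) ≠ pvRun 0 c (tp.map (fun x => pvDaysB x.1 x.2)) := by
  intro tp
  induction tp with
  | nil => intro _ hcond c; exact absurd hcond (by decide)
  | cons x tp' ih =>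
    intro hpre hcond c
    have hx := hpre x List.mem_cons_self
    obtain ⟨hB, hge, hqiff, hnonq⟩ := pvDays_facts x hx
    have hpre' : ∀ y ∈ tp', 0 < y.2 ∨ 100 < y.1 :=
      fun y hy => hpre y (List.mem_cons_of_mem _ hy)
    simp only [List.map_cons, pvRun]
    by_cases hq : pvQ x = true
    · have hA : pvDaysA x = -1 := hqiff.mp hq
      have hBe : pvDaysB x.1 x.2 = 0 := by rw [hB, hA]; rfl
      rw [hA, hBe, if_pos (le_refl (-1 : Int)), if_pos (le_refl (0 : Int))]
      rw [List.dropWhile_cons_of_pos hq] at hcond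
      exact ih hpre' hcond (c + 1)
    · have hqf : pvQ x = false := by simpa using hq
      rw [List.dropWhile_cons_of_neg (by simp [hqf])] at hcond
      simp only [List.headD_cons] at hcond
      have hA0 : pvDaysA x = 0 := (hnonq hqf).mpr hcond
      have hB0 : pvDaysB x.1 x.2 = 0 := by rw [hB, hA0]; rfl
      rw [hA0, hB0, if_neg (by omega : ¬ ((-1 : Int) ≥ 0)), if_pos (le_refl (0 : Int))]
      obtain ⟨h, rest, heq, hle⟩ := pvRun_head (tp'.map (fun y => pvDaysB y.1 y.2)) 0 (c + 1)
      rw [heq]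
      intro hcontra
      rw [List.cons.injEq] at hcontra
      omega

-- ===== VERDICT (by name: the statement is the Claim_ definition above) =====
theorem solution_spec : Claim_unchanged_solution := by
  intro progresses speeds hDom hPre hnD
  obtain ⟨hlen, hpre⟩ := hPre
  cases hzip : progresses.zip speeds with
  | nil =>
    have hs0 : speeds = [] := by
      have := congrArg List.length hzip
      simp only [List.length_zip, List.length_nil] at this
      exact List.eq_nil_of_length_eq_zero (by omega)
    subst hs0
    show solution progresses [] = solution_alt progresses []
    simp [solution, solution_alt, pvLoopA, List.zip_nil_right, PySem.List.pyRange_one_eq_nil]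
  | cons x tp =>
    rw [solution_eq_run progresses speeds hlen hpre x tp hzip,
      solution_alt_eq_run progresses speeds x tp hzip]
    have hxmem : x ∈ progresses.zip speeds := by rw [hzip]; exact List.mem_cons_self
    have hx := hpre x hxmem
    obtain ⟨hB, hge, hqiff, hnonq⟩ := pvDays_facts x hx
    have hmem_tp : ∀ y ∈ tp, 0 < y.2 ∨ 100 < y.1 :=
      fun y hy => hpre y (by rw [hzip]; exact List.mem_cons_of_mem _ hy)
    by_cases hq : pvQ x = true
    · have hAv : pvDaysA x = -1 := hqiff.mp hq
      have hB0 : pvDaysB x.1 x.2 = 0 := by rw [hB, hAv]; rfl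
      rw [hAv, hB0]
      have hfalse : ((tp.dropWhile pvQ).headD (0, 0)).1 < 100 := by
        by_contra hcon
        push Not at hcon
        apply hnD
        simp only [D_solution]
        rw [hzip, List.dropWhile_cons_of_pos hq]
        refine ⟨?_, hcon⟩
        intro heq
        have hle := List.length_dropWhile_le pvQ tp
        have := congrArg List.length heq
        simp only [List.length_cons] at this
        omega
      exact pvRun_neg_one tp hmem_tp hfalse 1
    · have hqf : pvQ x = false := by simpa using hq
      have hA0 : 0 ≤ pvDaysA x := by
        have h1 : pvDaysA x ≠ -1 := fun h => by rw [hqiff.mpr h] at hqf; cases hqf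
        omega
      rw [hB, max_eq_left hA0]
      have hmm : tp.map (fun y => pvDaysB y.1 y.2) = (tp.map pvDaysA).map (fun d => max d 0) := by
        rw [List.map_map]
        exact List.map_congr_left (fun y hy => (pvDays_facts y (hmem_tp y hy)).1)
      rw [hmm]
      exact pvRun_map_max _ (fun d hd => by
        obtain ⟨y, hy, rfl⟩ := List.mem_map.mp hd
        exact (pvDays_facts y (hmem_tp y hy)).2.1) _ 1 hA0

theorem solution_changed : Claim_changed_solution := by
  unfold Claim_changed_solution; decide

theorem solution_tight : Claim_exact_solution := by
  intro progresses speeds hDom hPre hD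
  obtain ⟨hlen, hpre⟩ := hPre
  simp only [D_solution] at hD
  cases hzip : progresses.zip speeds with
  | nil => rw [hzip] at hD; simp at hD
  | cons x tp =>
    rw [hzip] at hD
    have hq : pvQ x = true := by
      by_contra hqn
      have hqf : pvQ x = false := by simpa using hqn
      rw [List.dropWhile_cons_of_neg (by simp [hqf])] at hD
      exact hD.1 rfl
    rw [List.dropWhile_cons_of_pos hq] at hD
    rw [solution_eq_run progresses speeds hlen hpre x tp hzip,
      solution_alt_eq_run progresses speeds x tp hzip]
    have hx := hpre x (by rw [hzip]; exact List.mem_cons_self)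
    obtain ⟨hB, hge, hqiff, hnonq⟩ := pvDays_facts x hx
    have hAv : pvDaysA x = -1 := hqiff.mp hq
    have hB0 : pvDaysB x.1 x.2 = 0 := by rw [hB, hAv]; rfl
    rw [hAv, hB0]
    exact pvRun_neg_one_ne tp
      (fun y hy => hpre y (by rw [hzip]; exact List.mem_cons_of_mem _ hy)) hD.2 1
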